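-- pv_equiv track=rewrite | github.com/raj713335/LeetCode | Hard/3533 Concatenated Divisibility.py | concatenatedDivisibility
-- ===== SOURCE A (Python) =====
-- from typing import List
--
-- from functools import lru_cache
--
-- def concatenatedDivisibility(nums: List[int], k: int) -> List[int]:
--
--     quenlorvax = (nums, k)  # required by the problem
--
--     n = len(nums)
--     lens = [len(str(num)) for num in nums]
--     powers = [pow(10, l, k) for l in lens]
--
--     @lru_cache(maxsize=None)
--     def dfs(mask, mod):
--         if mask == (1 << n) - 1:
--             return [] if mod == 0 else None  # <-- THIS IS THE CORRECT FIX
--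
--         best = None
--         for i in range(n):
--             if not (mask & (1 << i)):
--                 new_mod = (mod * powers[i] + nums[i]) % k
--                 next_perm = dfs(mask | (1 << i), new_mod)
--
--                 if next_perm is not None:
--                     candidate = [nums[i]] + next_perm
--                     if best is None or candidate < best:
--                         best = candidate
--
--         return best
--
--     ans = dfs(0, 0)
--     return ans if ans is not None else []
-- ===== SOURCE B (Python) =====
-- from typing import List
--
-- def concatenatedDivisibility(nums: List[int], k: int) -> List[int]:
--     n = len(nums)
--     powers = [pow(10, len(str(num)), k) for num in nums]
--     full = (1 << n) - 1
--     memo = {}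
--
--     def feasible(mask, mod):
--         if mask == full:
--             return mod == 0
--         key = (mask, mod)
--         if key not in memo:
--             memo[key] = any(
--                 feasible(mask | (1 << i), (mod * powers[i] + nums[i]) % k)
--                 for i in range(n) if not mask & (1 << i))
--         return memo[key]
--
--     if not feasible(0, 0):
--         return []
--     order = sorted(range(n), key=lambda i: nums[i])
--     res, mask, mod = [], 0, 0
--     for _ in range(n):
--         for i in order:
--             if not mask & (1 << i):
--                 nm = (mod * powers[i] + nums[i]) % k
--                 if feasible(mask | (1 << i), nm):
--                     res.append(nums[i])
--                     mask |= 1 << i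
--                     mod = nm
--                     break
--     return res
-- ===== Notes on version B (the rewrite author's own statement) =====
-- stated objective: alternative
-- what changed: A memoises, for every (mask, mod) state, the lexicographically smallest completion LIST, building and comparing O(n)-long lists per state; B memoises only a boolean feasibility predicate and reconstructs the answer greedily, scanning indices in value-sorted order and committing to the first feasible one, so no candidate lists are ever built or compared (both remain exponential in n).
import Mathlib
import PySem

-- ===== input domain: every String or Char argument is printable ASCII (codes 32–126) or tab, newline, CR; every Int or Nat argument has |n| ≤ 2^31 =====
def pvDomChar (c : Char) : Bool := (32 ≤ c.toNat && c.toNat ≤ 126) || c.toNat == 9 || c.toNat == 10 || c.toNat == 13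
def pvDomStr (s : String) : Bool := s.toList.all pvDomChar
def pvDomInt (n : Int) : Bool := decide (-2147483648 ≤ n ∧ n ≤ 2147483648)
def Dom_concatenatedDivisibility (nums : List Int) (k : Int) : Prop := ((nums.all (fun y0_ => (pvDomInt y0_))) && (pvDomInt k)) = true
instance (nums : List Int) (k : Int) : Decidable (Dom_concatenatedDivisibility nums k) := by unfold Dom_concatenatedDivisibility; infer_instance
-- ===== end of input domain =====

-- B replaces A's exponential search over suffix LISTS (memoised, compared lexicographically and copied
-- at every state) by a boolean feasibility search plus a greedy reconstruction that scans candidate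
-- values in sorted order (both stay exponential in n); the return values agree for every k ≠ 0
-- (both Pythons raise at k = 0).

-- `(mod * powers[i] + nums[i]) % k`, the mod step both Pythons perform
-- (indices come from range(n), n = len(nums) = len(powers), so getD is exact)
def pvStepMod (nums powers : List Int) (k md : Int) (i : Nat) : Int :=
  PySem.Int.mod (md * powers.getD i 0 + nums.getD i 0) k

-- ===== PORT A =====
-- Python's `list <` on int lists is lexicographic — exactly Lean's `<` on `List Int`
def pvListLt (a b : List Int) : Bool := decide (a < b)

-- `dfs(mask, mod)` of A; lru_cache is pure memoisation, dropped; fuel = number of unused indices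
def pvDfsA (nums powers : List Int) (k : Int) (n : Nat) : Nat → Nat → Int → Option (List Int)
  | fuel, mask, md =>
    if mask = (1 <<< n) - 1 then (if md = 0 then some [] else none)
    else
      match fuel with
      | 0 => none
      | fuel' + 1 =>
        (List.range n).foldl (fun best i =>
          if mask &&& (1 <<< i) == 0 then
            match pvDfsA nums powers k n fuel' (mask ||| (1 <<< i)) (pvStepMod nums powers k md i) with
            | none => best
            | some nxt =>
              let cand := nums.getD i 0 :: nxt
              match best with
              | none => some cand
              | some b => if pvListLt cand b then some cand else best
          else best) none

def concatenatedDivisibility (nums : List Int) (k : Int) : List Int :=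
  let n := nums.length
  let lens := nums.map (fun num => (PySem.Int.toChars num).length)
  let powers := lens.map (fun l => PySem.Int.powMod 10 l k)
  match pvDfsA nums powers k n n 0 0 with
  | some ans => ans
  | none => []

-- ===== PORT B =====
-- `feasible(mask, mod)` of B; the memo dict is pure memoisation, dropped; fuel = number of unused indices
def pvFeasB (nums powers : List Int) (k : Int) (n : Nat) : Nat → Nat → Int → Bool
  | fuel, mask, md =>
    if mask = (1 <<< n) - 1 then md == 0
    else
      match fuel with
      | 0 => false
      | fuel' + 1 =>
        (List.range n).any (fun i =>
          mask &&& (1 <<< i) == 0 &&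
          pvFeasB nums powers k n fuel' (mask ||| (1 <<< i)) (pvStepMod nums powers k md i))

-- the `for _ in range(n)` greedy loop of B, building the result front-to-back
def pvGreedyB (nums powers : List Int) (k : Int) (n : Nat) (order : List Nat) :
    Nat → Nat → Int → List Int
  | 0, _, _ => []
  | fuel + 1, mask, md =>
    match order.find? (fun i =>
        mask &&& (1 <<< i) == 0 &&
        pvFeasB nums powers k n fuel (mask ||| (1 <<< i)) (pvStepMod nums powers k md i)) with
    | some i => nums.getD i 0 ::
        pvGreedyB nums powers k n order fuel (mask ||| (1 <<< i)) (pvStepMod nums powers k md i)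
    | none => pvGreedyB nums powers k n order fuel mask md

def concatenatedDivisibility_alt (nums : List Int) (k : Int) : List Int :=
  let n := nums.length
  let powers := nums.map (fun num => PySem.Int.powMod 10 (PySem.Int.toChars num).length k)
  if pvFeasB nums powers k n n 0 0 then
    pvGreedyB nums powers k n (PySem.List.sorted (List.range n) (fun i => nums.getD i 0)) n 0 0
  else []

-- ===== PRECONDITION & SPEC =====
-- Pre_ excludes only k = 0, where Python A raises ValueError in pow(10, l, 0) (and so does B).
def Pre_concatenatedDivisibility (nums : List Int) (k : Int) : Prop := k ≠ 0
instance (nums : List Int) (k : Int) : Decidable (Pre_concatenatedDivisibility nums k) := by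
  unfold Pre_concatenatedDivisibility; infer_instance
def pvWitness_concatenatedDivisibility : List Int × Int := ([12, 3], 3)

def Spec_concatenatedDivisibility (nums : List Int) (k : Int) (out : List Int) : Prop :=
  out = concatenatedDivisibility_alt nums k
instance (nums : List Int) (k : Int) (out : List Int) : Decidable (Spec_concatenatedDivisibility nums k out) := by
  unfold Spec_concatenatedDivisibility; infer_instance

-- ===== CLAIM (what is proved, stated in full; the proofs are below) =====
def Claim_equal_concatenatedDivisibility : Prop := ∀ (nums : List Int) (k : Int), Dom_concatenatedDivisibility nums k → Pre_concatenatedDivisibility nums k → Spec_concatenatedDivisibility nums k (concatenatedDivisibility nums k)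

-- ===== LEMMAS AND PROOFS =====

def pvFree (n mask : Nat) : List Nat := (List.range n).filter (fun i => mask &&& (1 <<< i) == 0)

theorem pv_free_iff (mask i : Nat) : (mask &&& (1 <<< i) == 0) = !mask.testBit i := by
  rw [Nat.one_shiftLeft, Nat.and_two_pow]
  cases h : mask.testBit i <;> simp [h, Nat.pos_iff_ne_zero, Nat.pow_eq_zero]

theorem pv_mem_free (n mask t : Nat) : t ∈ pvFree n mask ↔ t < n ∧ mask.testBit t = false := by
  simp [pvFree, List.mem_filter, pv_free_iff]

theorem pv_nodup_free (n mask : Nat) : (pvFree n mask).Nodup :=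
  (List.nodup_range).filter _

theorem pv_free_or (n mask i : Nat) :
    pvFree n (mask ||| (1 <<< i)) = (pvFree n mask).filter (fun t => t != i) := by
  unfold pvFree
  rw [List.filter_filter]
  apply List.filter_congr
  intro t _
  have h1 := pv_free_iff (mask ||| (1 <<< i)) t
  have h2 := pv_free_iff mask t
  rw [h1, h2, Nat.testBit_or, Nat.one_shiftLeft, Nat.testBit_two_pow]
  cases hb : mask.testBit t <;> by_cases hit : i = t <;> simp [hb, hit] <;> omega

theorem pv_free_or_length (n mask i : Nat) (hi : i ∈ pvFree n mask) :
    (pvFree n (mask ||| (1 <<< i))).length = (pvFree n mask).length - 1 := by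
  rw [pv_free_or, ← List.Nodup.erase_eq_filter (pv_nodup_free n mask),
    List.length_erase_of_mem hi]

theorem pv_full_of_free_nil (n mask : Nat) (hlt : mask < 2 ^ n) (h : pvFree n mask = []) :
    mask = (1 <<< n) - 1 := by
  rw [Nat.one_shiftLeft]
  apply Nat.eq_of_testBit_eq
  intro j
  rw [Nat.testBit_two_pow_sub_one]
  by_cases hj : j < n
  · have : j ∉ pvFree n mask := by simp [h]
    rw [pv_mem_free] at this
    simp only [hj, true_and] at this
    simp [hj]
    cases hb : mask.testBit j
    · exact absurd hb this
    · rfl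
  · simp only [hj, decide_false]
    exact Nat.testBit_lt_two_pow (lt_of_lt_of_le hlt (Nat.pow_le_pow_right (by norm_num) (by omega)))

theorem pv_not_full (n mask i : Nat) (hi : i ∈ pvFree n mask) : mask ≠ (1 <<< n) - 1 := by
  rw [pv_mem_free] at hi
  intro h
  subst h
  rw [Nat.one_shiftLeft, Nat.testBit_two_pow_sub_one] at hi
  simp [hi.1] at hi

theorem pv_or_lt (n mask i : Nat) (hlt : mask < 2 ^ n) (hi : i < n) :
    mask ||| (1 <<< i) < 2 ^ n := by
  rw [Nat.one_shiftLeft]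
  exact Nat.or_lt_two_pow hlt (Nat.pow_lt_pow_right (by norm_num) hi)

def pvOminStep (best : Option (List Int)) (c : List Int) : Option (List Int) :=
  match best with
  | none => some c
  | some b => if pvListLt c b then some c else some b

def pvOmin (l : List (List Int)) : Option (List Int) := l.foldl pvOminStep none

def pvCands (nums powers : List Int) (k : Int) (n fuel mask : Nat) (md : Int) : List (List Int) :=
  (pvFree n mask).filterMap (fun t =>
    (pvDfsA nums powers k n fuel (mask ||| (1 <<< t)) (pvStepMod nums powers k md t)).map
      (nums.getD t 0 :: ·))

theorem pv_ominStep_eq_min (b : Option (List Int)) (c : List Int) :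
    pvOminStep b c = some (Min.min (b.getD c) c) := by
  cases b with
  | none => simp [pvOminStep]
  | some b =>
    simp only [pvOminStep, Option.getD_some, pvListLt, min_def, decide_eq_true_eq]
    by_cases h : c < b
    · simp [h, not_le.mpr h]
    · simp only [h, if_false]
      by_cases h2 : b ≤ c
      · simp [h2]
      · exact absurd (not_le.mp h2) h

theorem pv_omin_foldl_some (l : List (List Int)) : ∀ b : List Int,
    l.foldl pvOminStep (some b) = some (l.foldl Min.min b) := by
  induction l with
  | nil => intro b; rfl
  | cons c l ih =>
    intro b
    rw [List.foldl_cons, pv_ominStep_eq_min, List.foldl_cons]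
    simp only [Option.getD_some]
    exact ih (Min.min b c)

theorem pv_omin_eq_min? (l : List (List Int)) : pvOmin l = l.min? := by
  cases l with
  | nil => rfl
  | cons a l =>
    rw [List.min?_cons']
    show List.foldl pvOminStep (pvOminStep none a) l = _
    rw [show pvOminStep none a = some a from rfl]
    exact pv_omin_foldl_some l a

theorem pv_dfsA_full (nums powers : List Int) (k : Int) (n fuel mask : Nat) (md : Int)
    (h : mask = (1 <<< n) - 1) :
    pvDfsA nums powers k n fuel mask md = if md = 0 then some [] else none := by
  cases fuel <;> rw [pvDfsA] <;> simp [h]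

theorem pv_feasB_full (nums powers : List Int) (k : Int) (n fuel mask : Nat) (md : Int)
    (h : mask = (1 <<< n) - 1) :
    pvFeasB nums powers k n fuel mask md = (md == 0) := by
  cases fuel <;> rw [pvFeasB] <;> simp [h]

theorem pv_dfsA_step (nums powers : List Int) (k : Int) (n fuel mask : Nat) (md : Int)
    (h : mask ≠ (1 <<< n) - 1) :
    pvDfsA nums powers k n (fuel + 1) mask md = pvOmin (pvCands nums powers k n fuel mask md) := by
  rw [pvDfsA]
  simp only [h, if_false]
  rw [PySem.List.foldl_if_eq_foldl_filter]
  rw [pvCands, pvOmin, List.foldl_filterMap, pvFree]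
  apply List.foldl_ext
  intro b t _
  cases pvDfsA nums powers k n fuel (mask ||| (1 <<< t)) (pvStepMod nums powers k md t) with
  | none => rfl
  | some nxt => cases b <;> rfl

theorem pv_feasB_step (nums powers : List Int) (k : Int) (n fuel mask : Nat) (md : Int)
    (h : mask ≠ (1 <<< n) - 1) :
    pvFeasB nums powers k n (fuel + 1) mask md =
      (pvFree n mask).any (fun t =>
        pvFeasB nums powers k n fuel (mask ||| (1 <<< t)) (pvStepMod nums powers k md t)) := by
  rw [pvFeasB]
  simp only [h, if_false]
  rw [pvFree, List.any_filter]

theorem pv_step_congr (nums : List Int) (k : Int) (f : Int → Int) (md : Int) (i j : Nat)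
    (hij : nums.getD i 0 = nums.getD j 0) (hi : i < nums.length) (hj : j < nums.length) :
    pvStepMod nums (nums.map f) k md i = pvStepMod nums (nums.map f) k md j := by
  unfold pvStepMod
  have gi : (nums.map f).getD i 0 = f (nums.getD i 0) := by
    rw [List.getD_eq_getElem?_getD, List.getElem?_map, List.getElem?_eq_getElem hi,
      List.getD_eq_getElem?_getD, List.getElem?_eq_getElem hi]
    rfl
  have gj : (nums.map f).getD j 0 = f (nums.getD j 0) := by
    rw [List.getD_eq_getElem?_getD, List.getElem?_map, List.getElem?_eq_getElem hj,
      List.getD_eq_getElem?_getD, List.getElem?_eq_getElem hj]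
    rfl
  rw [gi, gj, hij]

theorem pv_min?_perm (l l' : List (List Int)) (h : l.Perm l') : l.min? = l'.min? := by
  cases hm : l.min? with
  | none =>
    rw [List.min?_eq_none_iff] at hm
    subst hm
    rw [← h.nil_eq]; rfl
  | some a =>
    rw [List.min?_eq_some_iff] at hm
    symm
    rw [List.min?_eq_some_iff]
    exact ⟨h.mem_iff.mp hm.1, fun b hb => hm.2 b (h.mem_iff.mpr hb)⟩

theorem pv_find?_key_min (order : List Nat) (key : Nat → Int) (p : Nat → Bool) (i0 : Nat)
    (hp : order.Pairwise (fun a b => key a ≤ key b)) (hf : order.find? p = some i0) :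
    p i0 = true ∧ ∀ t ∈ order, p t = true → key i0 ≤ key t := by
  induction order with
  | nil => simp at hf
  | cons o os ih =>
    rw [List.find?_cons] at hf
    rcases List.pairwise_cons.mp hp with ⟨ho, hos⟩
    by_cases hpo : p o
    · simp only [hpo, if_pos rfl] at hf
      cases hf
      refine ⟨hpo, ?_⟩
      intro t ht _
      rcases List.mem_cons.mp ht with rfl | ht
      · exact le_refl _
      · exact ho t ht
    · simp only [hpo] at hf
      rcases ih hos hf with ⟨h1, h2⟩
      refine ⟨h1, ?_⟩
      intro t ht hpt
      rcases List.mem_cons.mp ht with rfl | ht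
      · exact absurd hpt hpo
      · exact h2 t ht hpt

theorem pv_mem_free_of_ne (n mask i t : Nat) (hi : i ∈ pvFree n mask) (hne : i ≠ t) :
    i ∈ pvFree n (mask ||| (1 <<< t)) := by
  rw [pv_free_or, List.mem_filter]
  exact ⟨hi, by simp [hne]⟩

theorem pv_or_swap (m x y : Nat) : (m ||| x) ||| y = (m ||| y) ||| x := by
  rw [Nat.or_assoc, Nat.or_assoc, Nat.or_comm x y]

def pvInv (nums : List Int) (k : Int) (f : Int → Int) (n : Nat) (order : List Nat) (fuel : Nat) : Prop :=
  (∀ mask md, mask < 2 ^ n → (pvFree n mask).length = fuel →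
      (pvFeasB nums (nums.map f) k n fuel mask md =
        (pvDfsA nums (nums.map f) k n fuel mask md).isSome)
    ∧ (∀ l, pvDfsA nums (nums.map f) k n fuel mask md = some l →
        pvGreedyB nums (nums.map f) k n order fuel mask md = l))
  ∧ (∀ mask md i j, mask < 2 ^ n → (pvFree n mask).length = fuel + 1 →
      i ∈ pvFree n mask → j ∈ pvFree n mask → nums.getD i 0 = nums.getD j 0 →
      pvDfsA nums (nums.map f) k n fuel (mask ||| (1 <<< i)) md =
      pvDfsA nums (nums.map f) k n fuel (mask ||| (1 <<< j)) md)

theorem pv_inv (nums : List Int) (k : Int) (f : Int → Int) (n : Nat) (order : List Nat)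
    (hn : n ≤ nums.length)
    (hordp : order.Pairwise (fun a b => nums.getD a 0 ≤ nums.getD b 0))
    (hordm : ∀ t, t < n → t ∈ order) (hordlt : ∀ t ∈ order, t < n) :
    ∀ fuel, pvInv nums k f n order fuel := by
  intro fuel
  induction fuel with
  | zero =>
    constructor
    · intro mask md hlt hlen
      have hfull : mask = (1 <<< n) - 1 :=
        pv_full_of_free_nil n mask hlt (List.length_eq_zero_iff.mp hlen)
      rw [pv_feasB_full _ _ _ _ _ _ _ hfull, pv_dfsA_full _ _ _ _ _ _ _ hfull]
      constructor
      · by_cases h0 : md = 0 <;> simp [h0]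
      · intro l hl
        by_cases h0 : md = 0 <;> simp [h0] at hl
        rw [pvGreedyB, ← hl]
    · intro mask md i j _ hlen hi hj _
      rcases List.length_eq_one_iff.mp hlen with ⟨x, hx⟩
      rw [hx, List.mem_singleton] at hi hj
      rw [hi, hj]
  | succ fuel ih =>
    rcases ih with ⟨ih1, ihT⟩
    have hT : ∀ mask md i j, mask < 2 ^ n → (pvFree n mask).length = fuel + 2 →
        i ∈ pvFree n mask → j ∈ pvFree n mask → nums.getD i 0 = nums.getD j 0 →
        pvDfsA nums (nums.map f) k n (fuel + 1) (mask ||| (1 <<< i)) md =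
        pvDfsA nums (nums.map f) k n (fuel + 1) (mask ||| (1 <<< j)) md := by
      intro mask md i j hlt hlen hi hj hv
      by_cases hij : i = j
      · rw [hij]
      have hi_lt : i < n := ((pv_mem_free n mask i).mp hi).1
      have hj_lt : j < n := ((pv_mem_free n mask j).mp hj).1
      have hjM1 : j ∈ pvFree n (mask ||| (1 <<< i)) :=
        pv_mem_free_of_ne n mask j i hj (fun h => hij h.symm)
      have hiM2 : i ∈ pvFree n (mask ||| (1 <<< j)) :=
        pv_mem_free_of_ne n mask i j hi hij
      have hnf1 := pv_not_full n _ j hjM1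
      have hnf2 := pv_not_full n _ i hiM2
      rw [pv_dfsA_step _ _ _ _ _ _ _ hnf1, pv_dfsA_step _ _ _ _ _ _ _ hnf2,
        pv_omin_eq_min?, pv_omin_eq_min?]
      apply pv_min?_perm
      unfold pvCands
      have hstep : pvStepMod nums (nums.map f) k md j = pvStepMod nums (nums.map f) k md i :=
        pv_step_congr nums k f md j i hv.symm (lt_of_lt_of_le hj_lt hn) (lt_of_lt_of_le hi_lt hn)
      have hcong : ∀ t ∈ pvFree n (mask ||| (1 <<< i)),
          (pvDfsA nums (nums.map f) k n fuel ((mask ||| (1 <<< i)) ||| (1 <<< t))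
              (pvStepMod nums (nums.map f) k md t)).map (nums.getD t 0 :: ·)
          = (pvDfsA nums (nums.map f) k n fuel
                ((mask ||| (1 <<< j)) ||| (1 <<< (if t = j then i else t)))
                (pvStepMod nums (nums.map f) k md (if t = j then i else t))).map
              (nums.getD (if t = j then i else t) 0 :: ·) := by
        intro t htm
        have htf : t ∈ (pvFree n mask).filter (fun s => s != i) := by
          rw [← pv_free_or]; exact htm
        rw [List.mem_filter] at htf
        have htne_i : t ≠ i := by simpa using htf.2
        by_cases htj : t = j
        · subst htj
          simp only [if_pos rfl]
          rw [pv_or_swap mask (1 <<< i) (1 <<< t), hstep, hv.symm]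
          simp
        · simp only [if_neg htj]
          have hlen' : (pvFree n (mask ||| (1 <<< t))).length = fuel + 1 := by
            rw [pv_free_or_length n mask t htf.1, hlen]
            omega
          have hrec := ihT (mask ||| (1 <<< t)) (pvStepMod nums (nums.map f) k md t) i j
            (pv_or_lt n mask t hlt ((pv_mem_free n mask t).mp htf.1).1) hlen'
            (pv_mem_free_of_ne n mask i t hi (Ne.symm htne_i))
            (pv_mem_free_of_ne n mask j t hj (fun h => htj h.symm)) hv
          rw [pv_or_swap mask (1 <<< i) (1 <<< t), pv_or_swap mask (1 <<< j) (1 <<< t), hrec]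
      rw [List.filterMap_congr hcong]
      have hperm : ((pvFree n (mask ||| (1 <<< i))).map (fun t => if t = j then i else t)).Perm
          (pvFree n (mask ||| (1 <<< j))) := by
        apply (List.perm_ext_iff_of_nodup ?_ (pv_nodup_free n _)).mpr
        · intro x
          rw [pv_free_or n mask i, pv_free_or n mask j, List.mem_map]
          constructor
          · rintro ⟨t, htm, rfl⟩
            rw [List.mem_filter] at htm
            by_cases htj : t = j
            · subst htj
              simp only [if_pos rfl, List.mem_filter]
              refine ⟨hi, by simp [hij]⟩
            · simp only [if_neg htj, List.mem_filter]
              exact ⟨htm.1, by simp [htj]⟩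
          · intro hx
            rw [List.mem_filter] at hx
            have hxj : x ≠ j := by simpa using hx.2
            by_cases hxi : x = i
            · refine ⟨j, ?_, by simp [hxi]⟩
              rw [List.mem_filter]
              exact ⟨hj, by simp [Ne.symm hij]⟩
            · refine ⟨x, ?_, by simp [hxj]⟩
              rw [List.mem_filter]
              exact ⟨hx.1, by simp [hxi]⟩
        · apply List.Nodup.map_on ?_ (pv_nodup_free n _)
          intro x hx y hy hxy
          rw [pv_free_or n mask i, List.mem_filter] at hx hy
          have hxi : x ≠ i := by simpa using hx.2
          have hyi : y ≠ i := by simpa using hy.2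
          by_cases h1 : x = j <;> by_cases h2 : y = j <;> simp [h1, h2] at hxy <;> simp_all
      have hres := List.Perm.filterMap (fun t =>
        (pvDfsA nums (nums.map f) k n fuel ((mask ||| (1 <<< j)) ||| (1 <<< t))
          (pvStepMod nums (nums.map f) k md t)).map (nums.getD t 0 :: ·)) hperm
      rw [List.filterMap_map] at hres
      exact hres
    refine ⟨?_, hT⟩
    intro mask md hlt hlen
    obtain ⟨e, he⟩ := List.exists_mem_of_length_pos
      (show 0 < (pvFree n mask).length by omega)
    have hnf := pv_not_full n mask e he
    have hnext : ∀ t ∈ pvFree n mask,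
        (mask ||| (1 <<< t)) < 2 ^ n ∧ (pvFree n (mask ||| (1 <<< t))).length = fuel := by
      intro t ht
      refine ⟨pv_or_lt n mask t hlt ((pv_mem_free n mask t).mp ht).1, ?_⟩
      rw [pv_free_or_length n mask t ht, hlen]
      omega
    have hFt : ∀ t ∈ pvFree n mask,
        pvFeasB nums (nums.map f) k n fuel (mask ||| (1 <<< t)) (pvStepMod nums (nums.map f) k md t)
        = (pvDfsA nums (nums.map f) k n fuel (mask ||| (1 <<< t))
            (pvStepMod nums (nums.map f) k md t)).isSome := by
      intro t ht
      exact (ih1 _ _ (hnext t ht).1 (hnext t ht).2).1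
    constructor
    · -- feasibility agrees
      rw [pv_feasB_step _ _ _ _ _ _ _ hnf, pv_dfsA_step _ _ _ _ _ _ _ hnf, pv_omin_eq_min?]
      apply Bool.coe_iff_coe.mp
      rw [List.any_eq_true]
      constructor
      · rintro ⟨t, ht, hFtrue⟩
        rw [hFt t ht] at hFtrue
        obtain ⟨r, hr⟩ := Option.isSome_iff_exists.mp hFtrue
        have hcmem : (nums.getD t 0 :: r) ∈ pvCands nums (nums.map f) k n fuel mask md := by
          rw [pvCands, List.mem_filterMap]
          exact ⟨t, ht, by rw [hr]; rfl⟩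
        cases hm : (pvCands nums (nums.map f) k n fuel mask md).min? with
        | none => rw [List.min?_eq_none_iff] at hm; rw [hm] at hcmem; simp at hcmem
        | some _ => rfl
      · intro hs
        obtain ⟨m0, hm0⟩ := Option.isSome_iff_exists.mp hs
        obtain ⟨hmem, -⟩ := List.min?_eq_some_iff.mp hm0
        rw [pvCands, List.mem_filterMap] at hmem
        obtain ⟨t, ht, hmt⟩ := hmem
        obtain ⟨rt, hrt, -⟩ := Option.map_eq_some_iff.mp hmt
        exact ⟨t, ht, by rw [hFt t ht, hrt]; rfl⟩
    · -- greedy reproduces A's minimum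
      intro l hl
      rw [pv_dfsA_step _ _ _ _ _ _ _ hnf, pv_omin_eq_min?] at hl
      obtain ⟨hmem, hmin⟩ := List.min?_eq_some_iff.mp hl
      rw [pvCands, List.mem_filterMap] at hmem
      obtain ⟨t1, ht1, hmt1⟩ := hmem
      obtain ⟨r1, hr1, -⟩ := Option.map_eq_some_iff.mp hmt1
      have hfind : (order.find? (fun i =>
          mask &&& (1 <<< i) == 0 &&
          pvFeasB nums (nums.map f) k n fuel (mask ||| (1 <<< i))
            (pvStepMod nums (nums.map f) k md i))).isSome := by
        rw [List.find?_isSome]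
        refine ⟨t1, hordm t1 ((pv_mem_free n mask t1).mp ht1).1, ?_⟩
        rw [Bool.and_eq_true, pv_free_iff, ((pv_mem_free n mask t1).mp ht1).2, hFt t1 ht1, hr1]
        exact ⟨rfl, rfl⟩
      obtain ⟨i0, hi0⟩ := Option.isSome_iff_exists.mp hfind
      obtain ⟨hp0, hmin0⟩ := pv_find?_key_min order (fun a => nums.getD a 0) _ i0 hordp hi0
      rw [Bool.and_eq_true] at hp0
      have hi0_lt : i0 < n := hordlt i0 (List.mem_of_find?_eq_some hi0)
      have hi0_free : i0 ∈ pvFree n mask := by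
        rw [pv_mem_free]
        refine ⟨hi0_lt, ?_⟩
        have := hp0.1
        rw [pv_free_iff] at this
        cases h : mask.testBit i0
        · rfl
        · rw [h] at this; simp at this
      obtain ⟨r, hr⟩ : ∃ r, pvDfsA nums (nums.map f) k n fuel (mask ||| (1 <<< i0))
          (pvStepMod nums (nums.map f) k md i0) = some r := by
        apply Option.isSome_iff_exists.mp
        rw [← hFt i0 hi0_free]
        exact hp0.2
      have hc0mem : (nums.getD i0 0 :: r) ∈ pvCands nums (nums.map f) k n fuel mask md := by
        rw [pvCands, List.mem_filterMap]
        exact ⟨i0, hi0_free, by rw [hr]; rfl⟩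
      have hc0min : ∀ c ∈ pvCands nums (nums.map f) k n fuel mask md,
          (nums.getD i0 0 :: r) ≤ c := by
        intro c hc
        rw [pvCands, List.mem_filterMap] at hc
        obtain ⟨t, ht, hmt⟩ := hc
        obtain ⟨rt, hrt, hct⟩ := Option.map_eq_some_iff.mp hmt
        have ht_lt : t < n := ((pv_mem_free n mask t).mp ht).1
        have hpt : (mask &&& (1 <<< t) == 0 &&
            pvFeasB nums (nums.map f) k n fuel (mask ||| (1 <<< t))
              (pvStepMod nums (nums.map f) k md t)) = true := by
          rw [Bool.and_eq_true, pv_free_iff, ((pv_mem_free n mask t).mp ht).2, hFt t ht, hrt]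
          exact ⟨rfl, rfl⟩
        have hkey : nums.getD i0 0 ≤ nums.getD t 0 := hmin0 t (hordm t ht_lt) hpt
        rcases lt_or_eq_of_le hkey with hlt2 | heq
        · subst hct
          exact le_of_lt (List.cons_lt_cons_iff.mpr (Or.inl hlt2))
        · have hstepeq : pvStepMod nums (nums.map f) k md i0 = pvStepMod nums (nums.map f) k md t :=
            pv_step_congr nums k f md i0 t heq (lt_of_lt_of_le hi0_lt hn) (lt_of_lt_of_le ht_lt hn)
          have hDeq := ihT mask (pvStepMod nums (nums.map f) k md i0) i0 t hlt hlen hi0_free ht heq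
          rw [hstepeq] at hDeq hr
          rw [hDeq] at hr
          rw [hr] at hrt
          cases hrt
          subst hct
          rw [heq]
      have hleq : l = nums.getD i0 0 :: r :=
        le_antisymm (hmin _ hc0mem) (hc0min l (by
          rw [pvCands, List.mem_filterMap]
          exact ⟨t1, ht1, hmt1⟩))
      have hGr := (ih1 _ _ (hnext i0 hi0_free).1 (hnext i0 hi0_free).2).2 r hr
      rw [pvGreedyB, hi0, hleq]
      show nums.getD i0 0 :: pvGreedyB nums (nums.map f) k n order fuel (mask ||| (1 <<< i0))
          (pvStepMod nums (nums.map f) k md i0) = nums.getD i0 0 :: r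
      rw [hGr]

theorem pv_final (nums : List Int) (k : Int) :
    concatenatedDivisibility nums k = concatenatedDivisibility_alt nums k := by
  have hpw : (nums.map (fun num => (PySem.Int.toChars num).length)).map
      (fun l => PySem.Int.powMod 10 l k)
      = nums.map (fun num => PySem.Int.powMod 10 (PySem.Int.toChars num).length k) := by
    rw [List.map_map]; rfl
  have hfree0 : pvFree (nums.length) 0 = List.range nums.length := by
    unfold pvFree
    apply List.filter_eq_self.mpr
    intro a _
    simp [Nat.zero_and]
  have H := (pv_inv nums k (fun num => PySem.Int.powMod 10 (PySem.Int.toChars num).length k)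
      nums.length (PySem.List.sorted (List.range nums.length) (fun i => nums.getD i 0))
      (le_refl _)
      (PySem.List.sorted_pairwise _ _)
      (fun t ht => by
        rw [PySem.List.mem_sorted]
        exact List.mem_range.mpr ht)
      (fun t ht => by
        rw [PySem.List.mem_sorted] at ht
        exact List.mem_range.mp ht)
      nums.length).1 0 0 (Nat.two_pow_pos _) (by rw [hfree0, List.length_range])
  simp only [concatenatedDivisibility, concatenatedDivisibility_alt, hpw]
  cases hD : pvDfsA nums (nums.map (fun num => PySem.Int.powMod 10 (PySem.Int.toChars num).length k))
      k nums.length nums.length 0 0 with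
  | none =>
    rw [hD] at H
    rw [H.1]
    rfl
  | some l =>
    rw [hD] at H
    rw [H.1]
    simp only [Option.isSome_some, if_true]
    exact (H.2 l rfl).symm

-- ===== VERDICT (by name: the statement is the Claim_ definition above) =====
theorem concatenatedDivisibility_spec : Claim_equal_concatenatedDivisibility := by
  intro nums k _ _
  unfold Spec_concatenatedDivisibility
  exact pv_final nums k
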